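-- pv_equiv track=rewrite | github.com/owenps/forsenInsane | src/ocr.py | _fix_ocr_text
-- ===== SOURCE A (Python) =====
-- def _fix_ocr_text(text: str) -> str:
--     """Fix common OCR misreads for this specific pixel timer font."""
--     fixed = text.upper()
--
--     # Fix punctuation
--     for old, new in [("-", ":"), (";", ":"), ("'", ":"), (",", ".")]:
--         fixed = fixed.replace(old, new)
--
--     # Fix digit misreads
--     for old, new in [
--         ("O", "0"),
--         ("D", "0"),
--         ("Q", "0"),
--         ("U", "0"),
--         ("I", "1"),
--         ("L", "1"),
--         ("|", "1"),
--         ("J", "1"),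
--         ("Z", "2"),
--         ("E", "3"),
--         ("A", "4"),
--         ("H", "4"),
--         ("S", "5"),
--         ("G", "6"),
--         ("B", "8"),
--         ("P", "9"),
--     ]:
--         fixed = fixed.replace(old, new)
--
--     return fixed
-- ===== SOURCE B (Python) =====
-- _OCR_MAP = {
--     "-": ":", ";": ":", "'": ":", ",": ".",
--     "O": "0", "D": "0", "Q": "0", "U": "0",
--     "I": "1", "L": "1", "|": "1", "J": "1",
--     "Z": "2", "E": "3", "A": "4", "H": "4",
--     "S": "5", "G": "6", "B": "8", "P": "9",
-- }
--
--
-- def _fix_ocr_text(text: str) -> str: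
--     """Fix common OCR misreads in a single table-driven pass."""
--     return "".join(_OCR_MAP.get(c, c) for c in text.upper())
-- ===== Notes on version B (the rewrite author's own statement) =====
-- stated objective: idiomatic
-- what changed: Replaced 20 sequential whole-string .replace() scans by one mapping table consulted in a single table-driven pass over the uppercased text.
import Mathlib
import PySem

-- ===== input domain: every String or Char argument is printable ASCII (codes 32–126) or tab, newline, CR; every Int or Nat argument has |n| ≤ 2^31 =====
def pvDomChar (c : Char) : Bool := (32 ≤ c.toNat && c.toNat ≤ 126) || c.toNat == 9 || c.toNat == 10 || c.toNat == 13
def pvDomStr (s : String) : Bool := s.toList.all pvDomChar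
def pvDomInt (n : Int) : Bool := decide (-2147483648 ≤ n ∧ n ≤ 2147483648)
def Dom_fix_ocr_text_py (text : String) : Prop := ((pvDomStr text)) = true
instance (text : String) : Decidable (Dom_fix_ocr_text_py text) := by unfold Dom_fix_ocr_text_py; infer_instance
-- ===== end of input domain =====

-- B replaces A's 20 sequential whole-string .replace() scans by one lookup table
-- consulted in a single pass over the uppercased text (objective: idiomatic).

-- ===== PORT A =====
-- A: uppercase, then two loops of successive single-character string replacements.
def fix_ocr_text_py (text : String) : String :=
  let fixed := PySem.Str.upper text
  let fixed := [("-", ":"), (";", ":"), ("'", ":"), (",", ".")].foldl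
      (fun f (p : String × String) => PySem.Str.replace f p.1 p.2) fixed
  let fixed := [("O", "0"), ("D", "0"), ("Q", "0"), ("U", "0"),
                ("I", "1"), ("L", "1"), ("|", "1"), ("J", "1"),
                ("Z", "2"), ("E", "3"), ("A", "4"), ("H", "4"),
                ("S", "5"), ("G", "6"), ("B", "8"), ("P", "9")].foldl
      (fun f (p : String × String) => PySem.Str.replace f p.1 p.2) fixed
  fixed

-- ===== PORT B =====
-- B's module-level dict _OCR_MAP, as an association list of single characters.
def ocrMap : List (Char × Char) :=
  [('-', ':'), (';', ':'), ('\'', ':'), (',', '.'),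
   ('O', '0'), ('D', '0'), ('Q', '0'), ('U', '0'),
   ('I', '1'), ('L', '1'), ('|', '1'), ('J', '1'),
   ('Z', '2'), ('E', '3'), ('A', '4'), ('H', '4'),
   ('S', '5'), ('G', '6'), ('B', '8'), ('P', '9')]

-- B: one pass over the uppercased text, mapping each char through the table (get(c, c)).
def fix_ocr_text_py_alt (text : String) : String :=
  String.ofList ((PySem.Str.upper text).toList.map (fun c => ((ocrMap.lookup c).getD c)))

-- ===== PRECONDITION & SPEC =====
def Spec_fix_ocr_text_py (text : String) (out : String) : Prop := out = fix_ocr_text_py_alt text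
instance (text : String) (out : String) : Decidable (Spec_fix_ocr_text_py text out) := by unfold Spec_fix_ocr_text_py; infer_instance

-- ===== CLAIM (what is proved, stated in full; the proofs are below) =====
def Claim_equal_fix_ocr_text_py : Prop := ∀ (text : String), Dom_fix_ocr_text_py text → Spec_fix_ocr_text_py text (fix_ocr_text_py text)

-- ===== LEMMAS AND PROOFS =====

-- A single-character replace is a map over the characters.
theorem replace_go_single (a b : Char) :
    ∀ (l acc : List Char),
      PySem.Chars.replace.go [a] [b] l.length l acc
        = acc.reverse ++ l.map (fun c => if c == a then b else c) := by
  intro l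
  induction l with
  | nil => intro acc; simp [PySem.Chars.replace.go]
  | cons c t ih =>
      intro acc
      simp only [List.length_cons, PySem.Chars.replace.go, List.map_cons]
      by_cases h : c = a
      · subst h
        simp [List.isPrefixOf, ih, List.append_assoc]
      · have hba : ([a].isPrefixOf (c :: t)) = false := by
          simp [List.isPrefixOf]
          exact fun hc => h hc.symm
        simp [hba, h, ih, List.append_assoc]

theorem replace_single (a b : Char) (s : List Char) :
    PySem.Chars.replace s [a] [b] = s.map (fun c => if c == a then b else c) := by
  simpa [PySem.Chars.replace] using replace_go_single a b s []

-- Folding per-list maps over a list of pairs = one map folding per-character.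
theorem foldl_map_swap (ps : List (Char × Char)) :
    ∀ (s : List Char),
      ps.foldl (fun s p => s.map (fun c => if c == p.1 then p.2 else c)) s
        = s.map (fun c => ps.foldl (fun x p => if x == p.1 then p.2 else x) c) := by
  induction ps with
  | nil => intro s; simp
  | cons p t ih =>
      intro s
      rw [List.foldl_cons, ih, List.map_map]
      rfl

-- If x matches no key of ps, the per-character replacement chain leaves x alone.
theorem foldl_step_fixed (x : Char) :
    ∀ (ps : List (Char × Char)), (∀ q ∈ ps, (x == q.1) = false) →
      ps.foldl (fun x p => if x == p.1 then p.2 else x) x = x := by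
  intro ps
  induction ps with
  | nil => intro _; simp
  | cons p t ih =>
      intro h
      have hp := h p (List.mem_cons_self ..)
      rw [List.foldl_cons, if_neg (by simp [hp])]
      exact ih fun q hq => h q (List.mem_cons_of_mem _ hq)

-- Under "no output is a key", the sequential chain equals a first-match lookup.
theorem chain_eq_lookup (ps : List (Char × Char))
    (hsep : ∀ p ∈ ps, ∀ q ∈ ps, (p.2 == q.1) = false) (c : Char) :
    ps.foldl (fun x p => if x == p.1 then p.2 else x) c = (ps.lookup c).getD c := by
  induction ps with
  | nil => simp
  | cons p t ih =>
      by_cases h : c = p.1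
      · subst h
        have hfix : t.foldl (fun x p => if x == p.1 then p.2 else x) p.2 = p.2 :=
          foldl_step_fixed p.2 t fun q hq =>
            hsep p (List.mem_cons_self ..) q (List.mem_cons_of_mem _ hq)
        rw [List.foldl_cons, if_pos (by simp : (p.1 == p.1) = true), hfix]
        simp [List.lookup]
      · have h' : (c == p.1) = false := by simp [h]
        rw [List.foldl_cons, if_neg (by simp [h'])]
        simp only [List.lookup, h']
        exact ih fun a ha b hb =>
          hsep a (List.mem_cons_of_mem _ ha) b (List.mem_cons_of_mem _ hb)

-- A's whole computation, on characters, as one fold over ocrMap of single-char replaces.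
theorem A_toList (text : String) :
    (fix_ocr_text_py text).toList
      = ocrMap.foldl (fun s p => PySem.Chars.replace s [p.1] [p.2])
          (PySem.Chars.upper text.toList) := by
  simp [fix_ocr_text_py, ocrMap, List.foldl_cons, PySem.Str.toList_replace,
        PySem.Str.toList_upper]

theorem fix_toList_eq (text : String) :
    (fix_ocr_text_py text).toList = (fix_ocr_text_py_alt text).toList := by
  have hsep : ∀ p ∈ ocrMap, ∀ q ∈ ocrMap, (p.2 == q.1) = false := by decide
  calc (fix_ocr_text_py text).toList
      = ocrMap.foldl (fun s p => PySem.Chars.replace s [p.1] [p.2])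
          (PySem.Chars.upper text.toList) := A_toList text
    _ = ocrMap.foldl (fun s p => s.map (fun c => if c == p.1 then p.2 else c))
          (PySem.Chars.upper text.toList) := by
          simp only [replace_single]
    _ = (PySem.Chars.upper text.toList).map
          (fun c => ocrMap.foldl (fun x p => if x == p.1 then p.2 else x) c) :=
          foldl_map_swap ocrMap _
    _ = (PySem.Chars.upper text.toList).map (fun c => (ocrMap.lookup c).getD c) := by
          exact List.map_congr_left fun c _ => chain_eq_lookup ocrMap hsep c
    _ = (fix_ocr_text_py_alt text).toList := by
          simp [fix_ocr_text_py_alt, PySem.Str.toList_upper]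

-- ===== VERDICT (by name: the statement is the Claim_ definition above) =====
theorem fix_ocr_text_py_spec : Claim_equal_fix_ocr_text_py := by
  intro text _
  unfold Spec_fix_ocr_text_py
  exact String.toList_inj.mp (fix_toList_eq text)
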